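-- pv_equiv track=rewrite | github.com/EdwardZehuaZhang/3d-printing-monorepo | rhino8-internal-wire/Libraries/wire_router/core.py | compress_index_path
-- ===== SOURCE A (Python) =====
-- from typing import Dict, Iterable, Iterator, List, Optional, Sequence, Set, Tuple
--
-- GridIndex = Tuple[int, int, int]
--
-- def compress_index_path(path: Sequence[GridIndex]) -> List[GridIndex]:
--     if len(path) <= 2:
--         return list(path)
--
--     compressed = [path[0]]
--     previous_direction: Optional[GridIndex] = None
--
--     for current, nxt in zip(path[:-1], path[1:]):
--         direction = (
--             max(-1, min(1, nxt[0] - current[0])),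
--             max(-1, min(1, nxt[1] - current[1])),
--             max(-1, min(1, nxt[2] - current[2])),
--         )
--         if previous_direction is None:
--             previous_direction = direction
--             continue
--         if direction != previous_direction:
--             compressed.append(current)
--         previous_direction = direction
--
--     compressed.append(path[-1])
--     return compressed
-- ===== SOURCE B (Python) =====
-- def _step(a, b):
--     return (max(-1, min(1, b[0] - a[0])),
--             max(-1, min(1, b[1] - a[1])),
--             max(-1, min(1, b[2] - a[2])))
--
-- def compress_index_path(path):
--     if len(path) <= 2:
--         return list(path)
--     n = len(path)
--     out = [path[0]]
--     i = 0
--     while i < n - 1: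
--         d = _step(path[i], path[i + 1])
--         j = i + 1
--         while j < n - 1 and _step(path[j], path[j + 1]) == d:
--             j += 1
--         out.append(path[j])
--         i = j
--     return out
-- ===== Notes on version B (the rewrite author's own statement) =====
-- stated objective: alternative
-- what changed: Replaces A's single stateful pass (carrying previous_direction through every pair) with a run-skipping two-pointer scanner: an outer loop over maximal same-direction runs and an inner loop that skips to each run's end, appending the run endpoint; no direction state crosses iterations.
import Mathlib
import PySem

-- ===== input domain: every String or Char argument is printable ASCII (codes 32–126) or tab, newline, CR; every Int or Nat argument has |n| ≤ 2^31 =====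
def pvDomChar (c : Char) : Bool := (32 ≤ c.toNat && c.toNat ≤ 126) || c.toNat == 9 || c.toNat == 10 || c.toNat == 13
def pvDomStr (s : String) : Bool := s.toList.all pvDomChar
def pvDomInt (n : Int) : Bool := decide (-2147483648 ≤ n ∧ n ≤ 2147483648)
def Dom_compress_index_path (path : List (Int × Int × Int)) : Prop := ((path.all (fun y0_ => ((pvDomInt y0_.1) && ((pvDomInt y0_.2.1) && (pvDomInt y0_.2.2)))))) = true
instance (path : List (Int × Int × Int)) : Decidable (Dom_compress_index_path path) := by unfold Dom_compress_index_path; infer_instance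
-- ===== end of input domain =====

-- B replaces A's single stateful pass (previous_direction carried through every pair) by a
-- run-skipping two-pointer scanner: an outer loop per maximal same-direction run and an inner
-- loop that skips to the run's end; same O(n) cost, different control structure.

-- ===== PORT A =====
-- A's loop body: state = (compressed, previous_direction)
def pvLoopA (s : List (Int × Int × Int) × Option (Int × Int × Int))
    (pc : (Int × Int × Int) × (Int × Int × Int)) :
    List (Int × Int × Int) × Option (Int × Int × Int) :=
  let direction : Int × Int × Int :=
    (max (-1) (min 1 (pc.2.1 - pc.1.1)),
     max (-1) (min 1 (pc.2.2.1 - pc.1.2.1)),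
     max (-1) (min 1 (pc.2.2.2 - pc.1.2.2)))
  match s.2 with
  | none => (s.1, some direction)
  | some p => (if direction ≠ p then s.1 ++ [pc.1] else s.1, some direction)

def compress_index_path (path : List (Int × Int × Int)) : List (Int × Int × Int) :=
  if path.length ≤ 2 then path
  else
    let pairs := (PySem.List.slice path none (some (-1))).zip (PySem.List.slice path (some 1) none)
    let st := pairs.foldl pvLoopA ([PySem.List.pyGetD path 0 (0, 0, 0)], none)
    st.1 ++ [PySem.List.pyGetD path (-1) (0, 0, 0)]

-- ===== PORT B =====
-- B's helper _step
def pvStepB (a b : Int × Int × Int) : Int × Int × Int :=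
  (max (-1) (min 1 (b.1 - a.1)),
   max (-1) (min 1 (b.2.1 - a.2.1)),
   max (-1) (min 1 (b.2.2 - a.2.2)))

-- inner while loop: advance j while the step direction stays d
-- (fuel only makes the while loop total; it is always called with fuel = n, enough to finish)
def pvInner (path : List (Int × Int × Int)) (n : Nat) (d : Int × Int × Int) :
    Nat → Nat → Nat
  | 0, j => j
  | fuel + 1, j =>
    if j < n - 1 ∧
        pvStepB (PySem.List.pyGetD path (j : Int) (0, 0, 0))
                (PySem.List.pyGetD path ((j : Int) + 1) (0, 0, 0)) = d
    then pvInner path n d fuel (j + 1) else j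

-- outer while loop over runs: state = (i, out); fuel likewise always suffices
def pvOuterB (path : List (Int × Int × Int)) (n : Nat) :
    Nat → Nat → List (Int × Int × Int) → List (Int × Int × Int)
  | 0, _, out => out
  | fuel + 1, i, out =>
    if i < n - 1 then
      let d := pvStepB (PySem.List.pyGetD path (i : Int) (0, 0, 0))
                       (PySem.List.pyGetD path ((i : Int) + 1) (0, 0, 0))
      let j := pvInner path n d n (i + 1)
      pvOuterB path n fuel j (out ++ [PySem.List.pyGetD path (j : Int) (0, 0, 0)])
    else out

def compress_index_path_alt (path : List (Int × Int × Int)) : List (Int × Int × Int) :=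
  if path.length ≤ 2 then path
  else pvOuterB path path.length path.length 0 [PySem.List.pyGetD path 0 (0, 0, 0)]

-- ===== PRECONDITION & SPEC =====
def Spec_compress_index_path (path : List (Int × Int × Int)) (out : List (Int × Int × Int)) : Prop := out = compress_index_path_alt path
instance (path : List (Int × Int × Int)) (out : List (Int × Int × Int)) : Decidable (Spec_compress_index_path path out) := by unfold Spec_compress_index_path; infer_instance

-- ===== CLAIM (what is proved, stated in full; the proofs are below) =====
def Claim_equal_compress_index_path : Prop := ∀ (path : List (Int × Int × Int)), Dom_compress_index_path path → Spec_compress_index_path path (compress_index_path path)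

-- ===== LEMMAS AND PROOFS =====

-- what A's loop appends once previous_direction is set to d
def pvInteriorA (l : List ((Int × Int × Int) × (Int × Int × Int))) (d : Int × Int × Int) :
    List (Int × Int × Int) :=
  match l with
  | [] => []
  | (c, n) :: t => (if pvStepB c n ≠ d then [c] else []) ++ pvInteriorA t (pvStepB c n)

lemma pvFoldA (l : List ((Int × Int × Int) × (Int × Int × Int)))
    (acc : List (Int × Int × Int)) (d : Int × Int × Int) :
    (l.foldl pvLoopA (acc, some d)).1 = acc ++ pvInteriorA l d := by
  induction l generalizing acc d with
  | nil => simp [pvInteriorA]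
  | cons hd tl ih =>
    obtain ⟨c, n⟩ := hd
    simp only [List.foldl_cons, pvLoopA, pvInteriorA]
    rw [ih]
    by_cases h : pvStepB c n = d
    · simp [pvStepB] at h ⊢
      simp [h]
    · simp only [pvStepB] at h ⊢
      simp [h, List.append_assoc]

lemma pvZipDropLastTail (p : List (Int × Int × Int)) :
    p.dropLast.zip p.tail = p.zip p.tail := by
  induction p with
  | nil => simp
  | cons x t ih =>
    cases t with
    | nil => simp
    | cons y t' =>
      simp only [List.dropLast_cons₂, List.tail_cons, List.zip_cons_cons]
      exact congrArg _ ih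

-- list-level model of the inner while loop: drop the head while the step stays d
def pvRunTail (d : Int × Int × Int) : List (Int × Int × Int) → List (Int × Int × Int)
  | x :: y :: t => if pvStepB x y = d then pvRunTail d (y :: t) else x :: y :: t
  | l => l

lemma pvRunTail_ne_nil (d : Int × Int × Int) (l : List (Int × Int × Int)) (h : l ≠ []) :
    pvRunTail d l ≠ [] := by
  induction l with
  | nil => exact absurd rfl h
  | cons x t ih =>
    cases t with
    | nil => simp [pvRunTail]
    | cons y t' =>
      rw [pvRunTail]
      split
      · exact ih (by simp)
      · simp

-- what the outer loop still has to output when it stands at the suffix of the path from i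
def pvTailSpec : List (Int × Int × Int) → List (Int × Int × Int)
  | x :: y :: t => pvInteriorA ((y :: t).zip t) (pvStepB x y) ++ [(y :: t).getLastD (0, 0, 0)]
  | _ => []

lemma pvTailSpec_short (l : List (Int × Int × Int)) (h : l.length ≤ 1) : pvTailSpec l = [] := by
  match l with
  | [] => rfl
  | [x] => rfl
  | x :: y :: t => simp at h

-- bridge: A's interior pass on a suffix l equals head-of-run-tail plus the remaining spec
lemma pvBridge (d : Int × Int × Int) (l : List (Int × Int × Int)) (hl : l ≠ []) :
    pvInteriorA (l.zip l.tail) d ++ [l.getLastD (0, 0, 0)] =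
      (pvRunTail d l).getD 0 (0, 0, 0) :: pvTailSpec (pvRunTail d l) := by
  induction l with
  | nil => exact absurd rfl hl
  | cons x t ih =>
    cases t with
    | nil => simp [pvInteriorA, pvRunTail, pvTailSpec]
    | cons y t' =>
      rw [pvRunTail]
      by_cases h : pvStepB x y = d
      · rw [if_pos h]
        rw [← ih (by simp)]
        simp only [List.tail_cons, List.zip_cons_cons, pvInteriorA, h]
        simp
      · rw [if_neg h]
        simp only [List.tail_cons, List.zip_cons_cons, pvInteriorA, pvTailSpec]
        simp [h]

-- index access as getElem, with the Int cast normalised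
lemma pvGetNat (path : List (Int × Int × Int)) (k : Nat) (hk : k < path.length) :
    PySem.List.pyGetD path (k : Int) (0, 0, 0) = path[k] := by
  rw [PySem.List.pyGetD_natCast]
  simp [List.getD_eq_getElem?_getD, hk]

lemma pvGetNatSucc (path : List (Int × Int × Int)) (k : Nat) (hk : k + 1 < path.length) :
    PySem.List.pyGetD path ((k : Int) + 1) (0, 0, 0) = path[k + 1] := by
  rw [(by push_cast; ring : ((k : Int) + 1) = ((k + 1 : Nat) : Int))]
  exact pvGetNat path (k + 1) hk

lemma pvInner_ge (path : List (Int × Int × Int)) (n : Nat) (d : Int × Int × Int)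
    (fuel : Nat) : ∀ (j : Nat), j ≤ pvInner path n d fuel j := by
  induction fuel with
  | zero => intro j; simp [pvInner]
  | succ fuel ih =>
    intro j
    rw [pvInner]
    split
    · exact le_trans (by omega) (ih (j + 1))
    · exact le_refl j

lemma pvInner_drop (path : List (Int × Int × Int)) (d : Int × Int × Int) (fuel : Nat) :
    ∀ (j : Nat), j < path.length → path.length - 1 - j ≤ fuel →
      path.drop (pvInner path path.length d fuel j) = pvRunTail d (path.drop j) := by
  induction fuel with
  | zero =>
    intro j hj hf
    have e1 : path.drop j = path[j] :: path.drop (j + 1) := List.drop_eq_getElem_cons (by omega)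
    have e3 : path.drop (j + 1) = [] := List.drop_eq_nil_of_le (by omega)
    rw [pvInner, e1, e3]
    rfl
  | succ fuel ih =>
    intro j hj hf
    rw [pvInner]
    split
    next h =>
      obtain ⟨hlt, hstep⟩ := h
      rw [ih (j + 1) (by omega) (by omega)]
      have e1 : path.drop j = path[j] :: path.drop (j + 1) := List.drop_eq_getElem_cons (by omega)
      have e2 : path.drop (j + 1) = path[j + 1] :: path.drop (j + 2) :=
        List.drop_eq_getElem_cons (by omega)
      have hstep' : pvStepB path[j] path[j + 1] = d := by
        rw [pvGetNat path j (by omega), pvGetNatSucc path j (by omega)] at hstep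
        exact hstep
      rw [e1, e2, pvRunTail, if_pos hstep', ← e2]
    next h =>
      by_cases hl : j < path.length - 1
      · have e1 : path.drop j = path[j] :: path.drop (j + 1) := List.drop_eq_getElem_cons (by omega)
        have e2 : path.drop (j + 1) = path[j + 1] :: path.drop (j + 2) :=
          List.drop_eq_getElem_cons (by omega)
        have hstep' : ¬ pvStepB path[j] path[j + 1] = d := by
          intro hc
          apply h
          refine ⟨hl, ?_⟩
          rw [pvGetNat path j (by omega), pvGetNatSucc path j (by omega)]
          exact hc
        rw [e1, e2, pvRunTail, if_neg hstep', ← e2, ← e1]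
      · have e1 : path.drop j = path[j] :: path.drop (j + 1) := List.drop_eq_getElem_cons (by omega)
        have e3 : path.drop (j + 1) = [] := List.drop_eq_nil_of_le (by omega)
        rw [e1, e3]
        rfl

lemma pvOuterB_eq (path : List (Int × Int × Int)) (fuel : Nat) :
    ∀ (i : Nat) (out : List (Int × Int × Int)), i ≤ path.length →
      path.length - 1 - i ≤ fuel →
      pvOuterB path path.length fuel i out = out ++ pvTailSpec (path.drop i) := by
  induction fuel with
  | zero =>
    intro i out hi hf
    rw [pvOuterB, pvTailSpec_short _ (by simp only [List.length_drop]; omega)]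
    simp
  | succ fuel ih =>
    intro i out hi hf
    rw [pvOuterB]
    split
    next h =>
      have hi1 : i + 1 < path.length := by omega
      set d := pvStepB (PySem.List.pyGetD path (i : Int) (0, 0, 0))
        (PySem.List.pyGetD path ((i : Int) + 1) (0, 0, 0)) with hd
      set j := pvInner path path.length d path.length (i + 1) with hj
      have hji : i + 1 ≤ j := pvInner_ge path path.length d path.length (i + 1)
      have hdropj : path.drop j = pvRunTail d (path.drop (i + 1)) :=
        pvInner_drop path d path.length (i + 1) hi1 (by omega)
      have hne2 : path.drop (i + 1) ≠ [] := by
        simp only [ne_eq, List.drop_eq_nil_iff]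
        omega
      have hne : path.drop j ≠ [] := by
        rw [hdropj]
        exact pvRunTail_ne_nil d _ hne2
      have hjn : j < path.length := by
        by_contra hc
        exact hne (List.drop_eq_nil_of_le (by omega))
      rw [ih j _ (by omega) (by omega)]
      have hgj : PySem.List.pyGetD path (j : Int) (0, 0, 0) = (path.drop j).getD 0 (0, 0, 0) := by
        simp [PySem.List.pyGetD_natCast, List.getD_eq_getElem?_getD, List.getElem?_drop]
      have e1 : path.drop i = path[i] :: path.drop (i + 1) := List.drop_eq_getElem_cons (by omega)
      have e2 : path.drop (i + 1) = path[i + 1] :: path.drop (i + 2) :=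
        List.drop_eq_getElem_cons (by omega)
      have hd' : d = pvStepB path[i] path[i + 1] := by
        rw [hd, pvGetNat path i (by omega), pvGetNatSucc path i (by omega)]
      have hts : pvTailSpec (path.drop i) =
          (pvRunTail d (path.drop (i + 1))).getD 0 (0, 0, 0) ::
            pvTailSpec (pvRunTail d (path.drop (i + 1))) := by
        rw [← pvBridge d (path.drop (i + 1)) hne2]
        rw [e1, e2]
        simp only [pvTailSpec, ← e2, ← hd']
        rw [e2]
        simp
      rw [hgj, hdropj, hts]
      simp
    next h =>
      rw [pvTailSpec_short _ (by simp only [List.length_drop]; omega)]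
      simp

-- ===== VERDICT (by name: the statement is the Claim_ definition above) =====
theorem compress_index_path_spec : Claim_equal_compress_index_path := by
  intro path _
  unfold Spec_compress_index_path
  match path with
  | [] => rfl
  | [a] => rfl
  | [a, b] => rfl
  | a :: b :: c :: t =>
    -- B side
    rw [compress_index_path_alt, if_neg (by simp)]
    rw [pvOuterB_eq _ _ 0 _ (by omega) (by omega), List.drop_zero]
    -- A side
    rw [compress_index_path]
    rw [if_neg (by simp)]
    rw [PySem.List.slice_to_neg_one, PySem.List.slice_from_one, pvZipDropLastTail]
    simp only [List.tail_cons]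
    have hp : (a :: b :: c :: t).zip (b :: c :: t) = (a, b) :: ((b :: c :: t).zip (c :: t)) := by
      simp
    rw [hp, List.foldl_cons]
    have h1 : pvLoopA ([PySem.List.pyGetD (a :: b :: c :: t) 0 (0, 0, 0)], none) (a, b)
        = ([PySem.List.pyGetD (a :: b :: c :: t) 0 (0, 0, 0)], some (pvStepB a b)) := rfl
    rw [h1, pvFoldA]
    simp only [pvTailSpec, pvStepB]
    have hlast : PySem.List.pyGetD (a :: b :: c :: t) (-1) (0, 0, 0)
        = (b :: c :: t).getLastD (0, 0, 0) := by
      rw [PySem.List.pyGetD_neg_one (a :: b :: c :: t) (0, 0, 0) (by simp)]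
      simp only [List.getLastD_eq_getLast?]
      rw [List.getLast?_eq_some_getLast (by simp : (b :: c :: t) ≠ [])]
      simp [List.getLast_cons]
    rw [hlast]
    simp
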